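-- pv_equiv track=rewrite | github.com/AlexPerazzo/AdventofCode2022 | Advent Of Code 2022/Fresh 11th, 2022.py | monkey4_throw
-- ===== SOURCE A (Python) =====
-- def monkey4_throw(monkey0_count, monkey0_list, monkey6_list, monkey2_list):
--     for item in monkey0_list:
--         value = 7 + item
--         while value > 10000000:
--             value = value - 9699690
--
--         if value % 19 == 0:
--             monkey6_list.append(value)
--         else:
--             monkey2_list.append(value)
--         monkey0_count += 1
--     monkey0_list.clear()
--
--     return monkey0_count, monkey0_list, monkey6_list, monkey2_list
-- ===== SOURCE B (Python) =====
-- def _reduce(value):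
--     # closed form of "while value > 10000000: value -= 9699690"
--     if value > 10000000:
--         value -= 9699690 * ((value - 10000000 + 9699689) // 9699690)
--     return value
--
-- def monkey4_throw(monkey0_count, monkey0_list, monkey6_list, monkey2_list):
--     vals = [_reduce(7 + item) for item in monkey0_list]
--     return (monkey0_count + len(monkey0_list),
--             [],
--             monkey6_list + [v for v in vals if v % 19 == 0],
--             monkey2_list + [v for v in vals if v % 19 != 0])
-- ===== Notes on version B (the rewrite author's own statement) =====
-- stated objective: alternative
-- what changed: The per-item subtraction while-loop is replaced by one closed-form floor-division reduction, and the mutating per-item routing loop by a length formula plus two filters over a mapped list (A mutates its list arguments in place; B is pure, equivalence is about the return value).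
import Mathlib
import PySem

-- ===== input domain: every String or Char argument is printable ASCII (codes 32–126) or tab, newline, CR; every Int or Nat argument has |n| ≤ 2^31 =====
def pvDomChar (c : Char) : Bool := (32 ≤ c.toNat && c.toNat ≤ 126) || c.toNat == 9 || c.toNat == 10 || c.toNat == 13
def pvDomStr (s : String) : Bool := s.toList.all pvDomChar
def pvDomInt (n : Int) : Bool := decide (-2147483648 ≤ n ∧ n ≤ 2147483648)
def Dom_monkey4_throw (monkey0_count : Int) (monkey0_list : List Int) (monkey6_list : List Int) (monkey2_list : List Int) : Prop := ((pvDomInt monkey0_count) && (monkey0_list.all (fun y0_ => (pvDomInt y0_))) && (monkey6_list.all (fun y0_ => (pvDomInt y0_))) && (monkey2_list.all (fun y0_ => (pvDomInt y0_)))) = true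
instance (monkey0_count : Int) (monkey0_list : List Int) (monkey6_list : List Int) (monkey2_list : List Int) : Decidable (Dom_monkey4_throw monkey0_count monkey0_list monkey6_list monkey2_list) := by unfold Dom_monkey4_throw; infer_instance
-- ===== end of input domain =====

-- B replaces A's per-item subtraction while-loop by a single closed-form floor-division
-- reduction and the per-item routing loop by a length formula plus two filters (objective:
-- alternative). A mutates its list arguments in place; B is pure — equivalence is about
-- the return value only.

-- ===== PORT A =====
-- the inner "while value > 10000000: value -= 9699690" of A
def pvReduceA (value : Int) : Int :=
  if value > 10000000 then pvReduceA (value - 9699690) else value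
termination_by (value - 10000000).toNat
decreasing_by simp; omega

def monkey4_throw (monkey0_count : Int) (monkey0_list : List Int) (monkey6_list : List Int) (monkey2_list : List Int) : Int × List Int × List Int × List Int :=
  let s := monkey0_list.foldl (fun (s : Int × List Int × List Int) item =>
    let value := pvReduceA (7 + item)
    if PySem.Int.mod value 19 == 0 then (s.1 + 1, s.2.1 ++ [value], s.2.2)
    else (s.1 + 1, s.2.1, s.2.2 ++ [value])) (monkey0_count, monkey6_list, monkey2_list)
  (s.1, [], s.2.1, s.2.2)

-- ===== PORT B =====
-- closed-form reduction from Source B's _reduce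
def pvReduceB (value : Int) : Int :=
  if value > 10000000 then
    value - 9699690 * (PySem.Int.floordiv (value - 10000000 + 9699689) 9699690)
  else value

def monkey4_throw_alt (monkey0_count : Int) (monkey0_list : List Int) (monkey6_list : List Int) (monkey2_list : List Int) : Int × List Int × List Int × List Int :=
  let vals := monkey0_list.map (fun item => pvReduceB (7 + item))
  (monkey0_count + monkey0_list.length,
   [],
   monkey6_list ++ vals.filter (fun v => PySem.Int.mod v 19 == 0),
   monkey2_list ++ vals.filter (fun v => !(PySem.Int.mod v 19 == 0)))

-- ===== PRECONDITION & SPEC =====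
def Spec_monkey4_throw (monkey0_count : Int) (monkey0_list : List Int) (monkey6_list : List Int) (monkey2_list : List Int) (out : Int × List Int × List Int × List Int) : Prop := out = monkey4_throw_alt monkey0_count monkey0_list monkey6_list monkey2_list
instance (monkey0_count : Int) (monkey0_list : List Int) (monkey6_list : List Int) (monkey2_list : List Int) (out : Int × List Int × List Int × List Int) : Decidable (Spec_monkey4_throw monkey0_count monkey0_list monkey6_list monkey2_list out) := by unfold Spec_monkey4_throw; infer_instance

-- ===== CLAIM (what is proved, stated in full; the proofs are below) =====
def Claim_equal_monkey4_throw : Prop := ∀ (monkey0_count : Int) (monkey0_list : List Int) (monkey6_list : List Int) (monkey2_list : List Int), Dom_monkey4_throw monkey0_count monkey0_list monkey6_list monkey2_list → Spec_monkey4_throw monkey0_count monkey0_list monkey6_list monkey2_list (monkey4_throw monkey0_count monkey0_list monkey6_list monkey2_list)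

-- ===== LEMMAS AND PROOFS =====

theorem pvReduce_eq (value : Int) : pvReduceA value = pvReduceB value := by
  induction value using pvReduceA.induct with
  | case1 v h ih =>
    rw [pvReduceA, if_pos h, ih, pvReduceB, pvReduceB]
    rw [PySem.Int.floordiv_eq_ediv_of_pos (by norm_num),
        PySem.Int.floordiv_eq_ediv_of_pos (by norm_num)]
    split_ifs with h2 <;> omega
  | case2 v h =>
    rw [pvReduceA, if_neg h, pvReduceB, if_neg h]

theorem fold_eq (l0 : List Int) (c : Int) (l6 l2 : List Int) :
    l0.foldl (fun (s : Int × List Int × List Int) item =>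
      let value := pvReduceA (7 + item)
      if PySem.Int.mod value 19 == 0 then (s.1 + 1, s.2.1 ++ [value], s.2.2)
      else (s.1 + 1, s.2.1, s.2.2 ++ [value])) (c, l6, l2)
    = (c + l0.length,
       l6 ++ (l0.map (fun item => pvReduceB (7 + item))).filter (fun v => PySem.Int.mod v 19 == 0),
       l2 ++ (l0.map (fun item => pvReduceB (7 + item))).filter (fun v => !(PySem.Int.mod v 19 == 0))) := by
  induction l0 generalizing c l6 l2 with
  | nil => simp
  | cons x xs ih =>
    simp only [List.foldl_cons, List.map_cons, List.filter_cons]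
    by_cases h : (PySem.Int.mod (pvReduceA (7 + x)) 19 == 0) = true
    · rw [if_pos h, ih]
      rw [pvReduce_eq] at h
      simp only [h, Bool.not_true, Bool.false_eq_true, if_true, if_false, pvReduce_eq,
        List.length_cons]
      refine Prod.ext ?_ (Prod.ext ?_ rfl)
      · push_cast; ring
      · simp
    · rw [if_neg h, ih]
      rw [pvReduce_eq] at h
      simp only [Bool.not_eq_true] at h
      simp only [h, Bool.not_false, Bool.false_eq_true, if_true, if_false, pvReduce_eq,
        List.length_cons]
      refine Prod.ext ?_ (Prod.ext rfl ?_)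
      · push_cast; ring
      · simp

-- ===== VERDICT (by name: the statement is the Claim_ definition above) =====
theorem monkey4_throw_spec : Claim_equal_monkey4_throw := by
  intro c l0 l6 l2 _
  unfold Spec_monkey4_throw monkey4_throw monkey4_throw_alt
  rw [fold_eq]
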